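-- pv_equiv track=rewrite | github.com/veronicatozzo/distribution-network | src/dataset.py | select_one_patient_instance
-- ===== SOURCE A (Python) =====
-- def select_one_patient_instance(ids_):
--     """ Note: Will not be deterministic due to the set """
--     ids = set()
--     patient_ids = []
--     for id_ in ids_:
--         patient_id = id_.split('_')[0]
--         if patient_id in patient_ids:
--             continue
--         ids.add(id_)
--         patient_ids.append(patient_id)
--     return ids
-- ===== SOURCE B (Python) =====
-- def select_one_patient_instance(ids_):
--     """ Note: Will not be deterministic due to the set """
--     ids = set()
--     rest = [(id_, id_.split('_')[0]) for id_ in ids_]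
--     while rest:
--         head, patient_id = rest[0]
--         ids.add(head)
--         rest = [pair for pair in rest[1:] if pair[1] != patient_id]
--     return ids
-- ===== Notes on version B (the rewrite author's own statement) =====
-- stated objective: alternative
-- what changed: Replaces A's seen-prefix list with a continue-guard by a shrinking-worklist scheme: prefixes are precomputed into (id, prefix) pairs, then the loop repeatedly keeps the head of the remaining worklist and filters out every later pair sharing its prefix, so no membership structure is maintained at all.
import Mathlib
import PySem

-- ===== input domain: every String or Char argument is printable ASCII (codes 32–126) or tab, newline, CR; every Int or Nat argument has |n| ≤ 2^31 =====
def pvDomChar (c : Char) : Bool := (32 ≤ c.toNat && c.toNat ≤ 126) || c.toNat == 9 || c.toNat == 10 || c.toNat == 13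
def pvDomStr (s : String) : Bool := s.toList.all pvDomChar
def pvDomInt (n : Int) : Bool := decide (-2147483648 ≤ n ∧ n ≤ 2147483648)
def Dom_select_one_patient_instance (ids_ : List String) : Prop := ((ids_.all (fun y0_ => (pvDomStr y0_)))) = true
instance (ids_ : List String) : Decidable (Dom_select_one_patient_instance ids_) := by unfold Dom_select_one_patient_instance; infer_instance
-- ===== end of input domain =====

-- B replaces A's seen-prefix list + continue-guard by a shrinking worklist: keep the head,
-- filter out later ids with the same patient prefix, repeat (objective: alternative).

-- patient_id = id_.split('_')[0]; '_' is nonempty so split never returns [] and [0] never raises: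
-- headD "" is exact here.
def pvPatientId (id_ : String) : String := ((PySem.Str.split? id_ "_").getD []).headD ""

-- ===== PORT A =====
-- the for-loop over (ids, patient_ids)
def pvALoop : List String → PySem.Set String → List String → PySem.Set String
  | [], ids, _ => ids
  | id_ :: rest, ids, patient_ids =>
    let patient_id := pvPatientId id_
    if patient_ids.contains patient_id then
      pvALoop rest ids patient_ids
    else
      pvALoop rest (PySem.Set.add ids id_) (patient_ids ++ [patient_id])

def select_one_patient_instance (ids_ : List String) : List String :=
  pvALoop ids_ PySem.Set.empty []

-- ===== PORT B =====
-- the while-loop: take the head pair of the worklist, add its id, filter the tail by its prefix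
def pvBLoop : PySem.Set String → List (String × String) → PySem.Set String
  | ids, [] => ids
  | ids, head :: tail =>
    pvBLoop (PySem.Set.add ids head.1) (tail.filter (fun pair => pair.2 != head.2))
termination_by _ rest => rest.length
decreasing_by
  simp only [List.length_unattach]
  exact Nat.lt_succ_of_le (le_trans (List.length_filter_le _ _) (le_of_eq (List.length_attach ..)))

def select_one_patient_instance_alt (ids_ : List String) : List String :=
  pvBLoop PySem.Set.empty (ids_.map (fun id_ => (id_, pvPatientId id_)))

-- ===== PRECONDITION & SPEC =====
def Spec_select_one_patient_instance (ids_ : List String) (out : List String) : Prop := out = select_one_patient_instance_alt ids_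
instance (ids_ : List String) (out : List String) : Decidable (Spec_select_one_patient_instance ids_ out) := by unfold Spec_select_one_patient_instance; infer_instance

-- ===== CLAIM (what is proved, stated in full; the proofs are below) =====
def Claim_equal_select_one_patient_instance : Prop := ∀ (ids_ : List String), Dom_select_one_patient_instance ids_ → Spec_select_one_patient_instance ids_ (select_one_patient_instance ids_)

-- ===== LEMMAS AND PROOFS =====

-- Bridge: A's loop over the full suffix with seen-prefix list `patient_ids` equals B's loop
-- over the suffix pre-filtered to drop everything whose prefix is already seen.
lemma pvBLoop_nil (ids : PySem.Set String) : pvBLoop ids [] = ids := by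
  simp [pvBLoop]

lemma pvBLoop_cons (ids : PySem.Set String) (h : String × String) (t : List (String × String)) :
    pvBLoop ids (h :: t) = pvBLoop (PySem.Set.add ids h.1) (t.filter (fun pair => pair.2 != h.2)) := by
  simp [pvBLoop]

lemma pvLoop_agree (rest : List String) : ∀ (ids : PySem.Set String) (patient_ids : List String),
    pvALoop rest ids patient_ids
      = pvBLoop ids ((rest.map (fun id_ => (id_, pvPatientId id_))).filter
          (fun pair => !(patient_ids.contains pair.2))) := by
  induction rest with
  | nil => intro ids patient_ids; simp [pvALoop, pvBLoop_nil]
  | cons id_ rest ih =>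
    intro ids patient_ids
    by_cases hm : pvPatientId id_ ∈ patient_ids
    · -- A skips id_; the filter drops it too
      have h1 : pvALoop (id_ :: rest) ids patient_ids = pvALoop rest ids patient_ids := by
        simp [pvALoop, hm]
      have h2 : ((id_ :: rest).map (fun id_ => (id_, pvPatientId id_))).filter
            (fun pair => !(patient_ids.contains pair.2))
          = (rest.map (fun id_ => (id_, pvPatientId id_))).filter
            (fun pair => !(patient_ids.contains pair.2)) := by
        simp [hm]
      rw [h1, h2]
      exact ih ids patient_ids
    · have h1 : pvALoop (id_ :: rest) ids patient_ids
          = pvALoop rest (PySem.Set.add ids id_) (patient_ids ++ [pvPatientId id_]) := by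
        simp [pvALoop, hm]
      have h2 : ((id_ :: rest).map (fun id_ => (id_, pvPatientId id_))).filter
            (fun pair => !(patient_ids.contains pair.2))
          = (id_, pvPatientId id_) :: (rest.map (fun id_ => (id_, pvPatientId id_))).filter
            (fun pair => !(patient_ids.contains pair.2)) := by
        simp [hm]
      rw [h1, h2, pvBLoop_cons, ih (PySem.Set.add ids id_) (patient_ids ++ [pvPatientId id_])]
      congr 1
      rw [List.filter_filter]
      apply List.filter_congr
      intro x hx
      obtain ⟨y, -, rfl⟩ := List.mem_map.mp hx
      by_cases he : pvPatientId y = pvPatientId id_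
      · simp [he, hm]
      · simp [he]

-- ===== VERDICT (by name: the statement is the Claim_ definition above) =====
theorem select_one_patient_instance_spec : Claim_equal_select_one_patient_instance := by
  intro ids_ _
  unfold Spec_select_one_patient_instance select_one_patient_instance select_one_patient_instance_alt
  rw [pvLoop_agree ids_ PySem.Set.empty []]
  congr 1
  simp
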